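-- pv_equiv track=rewrite | github.com/xiema/codeforces_solutions | solutions/archive/1658C CShinjuandtheLostPermutation/shinjulostperm.py | solve
-- ===== SOURCE A (Python) =====
-- def solve(n, c):
--     o = False
--     for i in range(n):
--         if c[i] - c[(i-1)%n] > 1:
--             return False
--         if c[i] == 1:
--             if not o:
--                 o = True
--             else:
--                 return False
--     return o
-- ===== SOURCE B (Python) =====
-- def solve(n, c):
--     d = list(c[:n])
--     if n <= 0 or not d:
--         return False
--
--     # divide and conquer: each segment d[lo:hi] reports (number of 1s, all
--     # internal adjacent differences <= 1); halves are combined by checking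
--     # the one difference across the midpoint.
--     def scan(lo, hi):
--         if hi - lo == 1:
--             return (1 if d[lo] == 1 else 0), True
--         mid = (lo + hi) // 2
--         o1, k1 = scan(lo, mid)
--         o2, k2 = scan(mid, hi)
--         return o1 + o2, k1 and k2 and d[mid] - d[mid - 1] <= 1
--
--     ones, ok = scan(0, len(d))
--     return ones == 1 and ok and d[0] - d[-1] <= 1
-- ===== Notes on version B (the rewrite author's own statement) =====
-- stated objective: alternative
-- what changed: A's single index loop with modular wraparound indexing, a seen-a-1 flag and three early returns is replaced by a divide-and-conquer recursion: each half of the prefix c[:n] reports (count of 1s, internal adjacent diffs ok), halves are merged by checking the one difference across the midpoint, and the wraparound difference is checked once at the top.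
import Mathlib
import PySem

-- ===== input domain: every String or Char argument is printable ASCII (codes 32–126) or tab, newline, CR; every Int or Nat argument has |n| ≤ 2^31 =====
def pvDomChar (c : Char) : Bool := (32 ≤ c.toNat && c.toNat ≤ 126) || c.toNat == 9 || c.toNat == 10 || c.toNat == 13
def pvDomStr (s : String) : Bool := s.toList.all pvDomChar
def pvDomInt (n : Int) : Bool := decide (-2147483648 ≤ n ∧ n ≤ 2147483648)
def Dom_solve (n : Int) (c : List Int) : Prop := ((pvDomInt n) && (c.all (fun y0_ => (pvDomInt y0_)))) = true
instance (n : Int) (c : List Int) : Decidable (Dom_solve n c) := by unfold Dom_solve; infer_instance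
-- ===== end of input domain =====

-- B replaces A's index loop (modular wraparound indexing, seen-a-1 flag, early
-- returns) by a divide-and-conquer recursion over the prefix c[:n]: each half
-- reports (count of 1s, internal adjacent diffs ok), halves merge by checking
-- the one difference across the midpoint, and the wraparound difference is
-- checked once at the top; objective: alternative.

-- ===== PORT A =====
-- the 'for i in range(n)' loop of A with the seen-a-1 flag o; early returns become false
def solveLoopA (c : List Int) (n : Int) : List Int → Bool → Bool
  | [], o => o
  | i :: rest, o =>
    match PySem.List.pyGet? c i, PySem.List.pyGet? c (PySem.Int.mod (i - 1) n) with
    | some ci, some cj =>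
      if ci - cj > 1 then false
      else if ci = 1 then
        (if o = false then solveLoopA c n rest true else false)
      else solveLoopA c n rest o
    | _, _ => false   -- IndexError (never reached under Pre_solve)

def solve (n : Int) (c : List Int) : Bool :=
  solveLoopA c n (PySem.List.pyRange 0 n 1) false

-- ===== PORT B =====
-- B's inner 'scan(lo, hi)': (count of 1s in d[lo:hi], internal adjacent diffs ≤ 1).
-- All index accesses of Source B are in range (0 ≤ lo < mid < hi ≤ len d), so d[k] is
-- ported exactly as d.getD k 0; d[-1] is d.getD (d.length - 1) 0.
def scanB (d : List Int) : Nat → Nat → Nat → Int × Bool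
  | 0, _, _ => (0, true)   -- fuel exhausted: unreachable (fuel starts at the segment length)
  | f + 1, lo, hi =>
    if hi - lo = 1 then ((if d.getD lo 0 = 1 then 1 else 0), true)
    else if lo < hi then
      -- mid = (lo + hi) // 2; recurse on [lo, mid) and [mid, hi), merge at mid
      ((scanB d f lo ((lo + hi) / 2)).1 + (scanB d f ((lo + hi) / 2) hi).1,
       (scanB d f lo ((lo + hi) / 2)).2 && (scanB d f ((lo + hi) / 2) hi).2 &&
         decide (d.getD ((lo + hi) / 2) 0 - d.getD ((lo + hi) / 2 - 1) 0 ≤ 1))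
    else (0, true)   -- unreachable: scan is only called on nonempty segments

def solve_alt (n : Int) (c : List Int) : Bool :=
  let d := PySem.List.slice c none (some n)
  if n ≤ 0 || d.isEmpty then false
  else
    let r := scanB d d.length 0 d.length
    decide (r.1 = 1) && r.2 && decide (d.getD 0 0 - d.getD (d.length - 1) 0 ≤ 1)

-- ===== PRECONDITION & SPEC =====
-- Pre_ excludes exactly the inputs with n > len(c), on which A raises IndexError.
def Pre_solve (n : Int) (c : List Int) : Prop := n ≤ c.length
instance (n : Int) (c : List Int) : Decidable (Pre_solve n c) := by unfold Pre_solve; infer_instance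
def pvWitness_solve : Int × List Int := (3, [2, 1, 2])

def Spec_solve (n : Int) (c : List Int) (out : Bool) : Prop := out = solve_alt n c
instance (n : Int) (c : List Int) (out : Bool) : Decidable (Spec_solve n c out) := by unfold Spec_solve; infer_instance

-- ===== CLAIM (what is proved, stated in full; the proofs are below) =====
def Claim_equal_solve : Prop := ∀ (n : Int) (c : List Int), Dom_solve n c → Pre_solve n c → Spec_solve n c (solve n c)

-- ===== LEMMAS AND PROOFS =====

-- elementwise pieces of A's loop body
def diffOkA (c : List Int) (n : Int) (i : Int) : Bool :=
  match PySem.List.pyGet? c i, PySem.List.pyGet? c (PySem.Int.mod (i - 1) n) with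
  | some ci, some cj => decide (ci - cj ≤ 1)
  | _, _ => false

def oneAtA (c : List Int) (i : Int) : Bool :=
  match PySem.List.pyGet? c i with
  | some ci => decide (ci = 1)
  | none => false

-- characterisation of A's loop: result = all diffs ok ∧ the remaining number of 1s matches the flag
lemma solveLoopA_char (c : List Int) (n : Int) :
    ∀ (s : List Int) (o : Bool),
      solveLoopA c n s o
        = (s.all (diffOkA c n) && decide (s.countP (oneAtA c) = (if o then 0 else 1))) := by
  intro s
  induction s with
  | nil => intro o; cases o <;> simp [solveLoopA]
  | cons i rest ih =>
    intro o
    simp only [solveLoopA]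
    cases h1 : PySem.List.pyGet? c i with
    | none => simp [List.all_cons, diffOkA, h1]
    | some ci =>
      cases h2 : PySem.List.pyGet? c (PySem.Int.mod (i - 1) n) with
      | none => simp [List.all_cons, diffOkA, h1, h2]
      | some cj =>
        by_cases hgt : ci - cj > 1
        · simp [List.all_cons, diffOkA, h1, h2, hgt]
          omega
        · have hdk : diffOkA c n i = true := by simp [diffOkA, h1, h2]; omega
          have honeb : oneAtA c i = decide (ci = 1) := by simp [oneAtA, h1]
          by_cases hone : ci = 1
          · subst hone
            cases o with
            | false =>
              simp only [if_neg hgt, List.all_cons, List.countP_cons, honeb, ih true, hdk]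
              simp
            | true =>
              simp only [if_neg hgt, List.all_cons, List.countP_cons, honeb, hdk]
              simp
          · simp only [if_neg hgt, if_neg hone, List.all_cons, List.countP_cons, honeb, ih o, hdk]
            simp [hone]

-- characterisation of B's scan: count of 1s over the index range, and all
-- internal adjacent differences ≤ 1
lemma scanB_char (d : List Int) :
    ∀ (fuel lo hi : Nat), hi - lo ≤ fuel → lo < hi →
      scanB d fuel lo hi =
        ((((List.range' lo (hi - lo)).countP (fun k => decide (d.getD k 0 = 1)) : ℕ) : Int),
         (List.range' (lo + 1) (hi - lo - 1)).all
           (fun k => decide (d.getD k 0 - d.getD (k - 1) 0 ≤ 1))) := by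
  intro fuel
  induction fuel with
  | zero => intro lo hi hle hlt; omega
  | succ f ih =>
    intro lo hi hle hlt
    rw [scanB]
    by_cases h1 : hi - lo = 1
    · rw [if_pos h1, h1]
      simp only [List.range', List.countP_cons, List.countP_nil, List.all_nil]
      simp
    · rw [if_neg h1, if_pos hlt]
      have h2 : lo + 2 ≤ hi := by omega
      set mid := (lo + hi) / 2 with hmid
      have hm1 : lo < mid := by omega
      have hm2 : mid < hi := by omega
      rw [ih lo mid (by omega) hm1, ih mid hi (by omega) hm2]
      rw [Prod.mk.injEq]
      constructor
      · -- counts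
        have := @List.range'_append lo (mid - lo) (hi - mid) 1
        rw [show lo + 1 * (mid - lo) = mid by omega, show (mid - lo) + (hi - mid) = hi - lo by omega] at this
        rw [← this, List.countP_append]
        push_cast
        ring
      · -- diffs
        have happ := @List.range'_append (lo + 1) (mid - lo - 1) (hi - mid) 1
        rw [show lo + 1 + 1 * (mid - lo - 1) = mid by omega,
          show (mid - lo - 1) + (hi - mid) = hi - lo - 1 by omega] at happ
        rw [← happ, show List.range' mid (hi - mid) = mid :: List.range' (mid + 1) (hi - mid - 1) from by
          conv_lhs => rw [show hi - mid = (hi - mid - 1) + 1 from by omega, List.range'_succ]]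
        simp only [List.all_append, List.all_cons]
        ac_rfl

lemma all_congr_mem {α : Type} {l : List α} {p q : α → Bool}
    (h : ∀ a ∈ l, p a = q a) : l.all p = l.all q := by
  induction l with
  | nil => rfl
  | cons a t ih =>
    simp only [List.all_cons, h a (by simp)]
    rw [ih (fun b hb => h b (by simp [hb]))]

theorem solve_spec : Claim_equal_solve := by
  intro n c _ hpre
  have hlen : n ≤ (c.length : Int) := hpre
  unfold Spec_solve
  by_cases hn : n ≤ 0
  · simp [solve, solve_alt, solveLoopA, PySem.List.pyRange_one_eq_nil hn, hn]
  · have hnpos : 0 < n := by omega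
    have h0 : 0 ≤ n := le_of_lt hnpos
    set m := n.toNat with hm
    have hmn : (m : Int) = n := Int.toNat_of_nonneg h0
    have hmpos : 0 < m := by omega
    have hmlen : m ≤ c.length := by omega
    -- A's loop in canonical form
    have hA : solve n c
        = ((List.range m).all (fun k => diffOkA c n ↑k)
           && decide (List.countP (fun k : Nat => oneAtA c (k : Int)) (List.range m) = 1)) := by
      rw [solve, solveLoopA_char, PySem.List.pyRange_one, List.all_map, List.countP_map]
      simp only [Int.sub_zero, Function.comp_def, zero_add, Bool.false_eq_true,
        if_false, ← hm]
    -- elementwise facts about A's body, for k < m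
    have hget : ∀ k, k < m → PySem.List.pyGet? c ↑k = some (c.getD k 0) := by
      intro k hk
      rw [PySem.List.pyGet?_natCast, List.getElem?_eq_getElem (by omega),
        List.getD_eq_getElem c 0 (by omega)]
    have hmod : ∀ k, k < m →
        PySem.Int.mod (↑k - 1) n = ((if k = 0 then m - 1 else k - 1 : ℕ) : Int) := by
      intro k hk
      rw [PySem.Int.mod_eq_emod_of_pos (by omega)]
      by_cases hk0 : k = 0
      · subst hk0
        rw [if_pos rfl, show ((0:ℕ):Int) - 1 = (n - 1) + n * (-1) by ring,
          Int.add_mul_emod_self_left, Int.emod_eq_of_lt (by omega) (by omega)]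
        omega
      · rw [if_neg hk0, Int.emod_eq_of_lt (by omega) (by omega)]
        omega
    have hone' : ∀ k, k < m → oneAtA c ↑k = decide (c.getD k 0 = 1) := by
      intro k hk; simp [oneAtA, hget k hk]
    have hdiff' : ∀ k, k < m →
        diffOkA c n ↑k
          = decide (c.getD k 0 - c.getD (if k = 0 then m - 1 else k - 1) 0 ≤ 1) := by
      intro k hk
      have h2 : PySem.List.pyGet? c (PySem.Int.mod (↑k - 1) n)
          = some (c.getD (if k = 0 then m - 1 else k - 1) 0) := by
        rw [hmod k hk]
        exact hget _ (by split_ifs <;> omega)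
      simp [diffOkA, hget k hk, h2]
    -- B's slice
    have hd : PySem.List.slice c none (some n) = c.take m := PySem.List.slice_to c h0
    have hdlen : (c.take m).length = m := by
      rw [List.length_take]; omega
    have hgetd : ∀ k, k < m → (c.take m).getD k 0 = c.getD k 0 := by
      intro k hk
      rw [List.getD, List.getD, List.getElem?_take, if_pos hk]
    have hne : (c.take m).isEmpty = false := by
      cases hcm : c.take m with
      | nil => rw [hcm] at hdlen; simp at hdlen; omega
      | cons a t => simp
    -- B in canonical form
    have hB : solve_alt n c
        = (decide ((List.range' 0 m).countP (fun k => decide (c.getD k 0 = 1)) = 1)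
           && (List.range' 1 (m - 1)).all
                (fun k => decide (c.getD k 0 - c.getD (k - 1) 0 ≤ 1))
           && decide (c.getD 0 0 - c.getD (m - 1) 0 ≤ 1)) := by
      rw [solve_alt]
      simp only [hd, hne, hdlen, decide_eq_true_eq, hn, Bool.or_false,
        if_false]
      rw [scanB_char (c.take m) m 0 m (by omega) hmpos]
      simp only [Nat.sub_zero, Nat.zero_add]
      have hc1 : (List.range' 0 m).countP (fun k => decide ((c.take m).getD k 0 = 1))
          = (List.range' 0 m).countP (fun k => decide (c.getD k 0 = 1)) := by
        apply List.countP_congr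
        intro k hk
        rw [List.mem_range'_1] at hk
        rw [hgetd k (by omega)]
      have hc2 : (List.range' 1 (m - 1)).all
            (fun k => decide ((c.take m).getD k 0 - (c.take m).getD (k - 1) 0 ≤ 1))
          = (List.range' 1 (m - 1)).all
            (fun k => decide (c.getD k 0 - c.getD (k - 1) 0 ≤ 1)) := by
        apply all_congr_mem
        intro k hk
        rw [List.mem_range'_1] at hk
        rw [hgetd k (by omega), hgetd (k - 1) (by omega)]
      have hcast : decide (((List.range' 0 m).countP
              (fun k => decide ((c.take m).getD k 0 = 1)) : ℕ) = (1 : Int))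
          = decide ((List.range' 0 m).countP (fun k => decide (c.getD k 0 = 1)) = 1) := by
        rw [decide_eq_decide, Nat.cast_eq_one, hc1]
      have hw' : decide ((c.take m).getD 0 0 - (c.take m).getD (m - 1) 0 ≤ 1)
          = decide (c.getD 0 0 - c.getD (m - 1) 0 ≤ 1) := by
        rw [decide_eq_decide, hgetd 0 (by omega), hgetd (m - 1) (by omega)]
      rw [hcast, hc2, hw']
    rw [hA, hB]
    -- split A's range at index 0: wraparound diff + internal diffs
    have hsplit : List.range m = 0 :: List.range' 1 (m - 1) := by
      rw [List.range_eq_range']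
      conv_lhs => rw [show m = (m - 1) + 1 from by omega, List.range'_succ]
    rw [hsplit]
    simp only [List.all_cons]
    have hw : diffOkA c n ((0 : ℕ) : Int) = decide (c.getD 0 0 - c.getD (m - 1) 0 ≤ 1) := by
      rw [hdiff' 0 hmpos]; simp
    have hint : (List.range' 1 (m - 1)).all (fun k => diffOkA c n ↑k)
        = (List.range' 1 (m - 1)).all
            (fun k => decide (c.getD k 0 - c.getD (k - 1) 0 ≤ 1)) := by
      apply all_congr_mem
      intro k hk
      rw [List.mem_range'_1] at hk
      rw [hdiff' k (by omega), if_neg (by omega)]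
    have hcnt : List.countP (fun k : Nat => oneAtA c (k : Int)) (0 :: List.range' 1 (m - 1))
        = (List.range' 0 m).countP (fun k => decide (c.getD k 0 = 1)) := by
      rw [← hsplit, List.range_eq_range']
      apply List.countP_congr
      intro k hk
      rw [List.mem_range'_1] at hk
      rw [hone' k (by omega)]
    rw [hw, hint, hcnt]
    cases decide ((List.range' 0 m).countP (fun k => decide (c.getD k 0 = 1)) = 1) <;>
      cases (List.range' 1 (m - 1)).all
        (fun k => decide (c.getD k 0 - c.getD (k - 1) 0 ≤ 1)) <;>
      cases decide (c.getD 0 0 - c.getD (m - 1) 0 ≤ 1) <;> simp
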